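-- pv_equiv track=rewrite | github.com/umoqnier/cl-2026-2-lab | notebooks/1_niveles_linguisticos.py | get_rhyming_patterns
-- ===== SOURCE A (Python) =====
-- from collections import defaultdict
--
-- def get_ipa_transcriptions(word: str, dataset: dict) -> list[str]:
--     """Search for a word in an IPA phonetics dict
--
--     Given a word this function return the IPA transcriptions
--
--     Parameters:
--     -----------
--     word: str
--         A word to search in the dataset
--     dataset: dict
--         A dataset for a given language code
--
--     Returns
--     -------
--     list[str]:
--         List with posible transcriptions if any,
--         else an empty list
--     """
--     return dataset.get(word.lower(), "").split(", ")
--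
-- def get_rhyming_patterns(sentence: str, dataset: dict) -> dict[str, list]:
--     words = sentence.split()
--     word_ipa_map = {}
--     for word in words:
--         ipa_transcriptions = get_ipa_transcriptions(word, dataset)
--         # Remove "/" char from transcriptions
--         word_ipa_map.update({word: [_.strip("/") for _ in ipa_transcriptions]})
--
--     rhyming_patterns = defaultdict(list)
--     for word, ipas in word_ipa_map.items():
--         for ipa in ipas:
--             # Getting last 2 elements of the ipa representation
--             pattern = ipa[-2:]
--             rhyming_patterns[pattern].append(word)
--     return rhyming_patterns
-- ===== SOURCE B (Python) =====
-- from collections import defaultdict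
--
-- def get_rhyming_patterns(sentence, dataset):
--     rhyming_patterns = defaultdict(list)
--     seen = set()
--     for word in sentence.split():
--         if word in seen:
--             continue
--         seen.add(word)
--         for ipa in dataset.get(word.lower(), "").split(", "):
--             rhyming_patterns[ipa.strip("/")[-2:]].append(word)
--     return rhyming_patterns
-- ===== Notes on version B (the rewrite author's own statement) =====
-- stated objective: simpler
-- what changed: Replaces A's two-phase scheme (build a word->IPA dict, then a second loop grouping over its items) with one pass over sentence.split() that skips already-seen words via a set and appends each word directly into the pattern groups.
import Mathlib
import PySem

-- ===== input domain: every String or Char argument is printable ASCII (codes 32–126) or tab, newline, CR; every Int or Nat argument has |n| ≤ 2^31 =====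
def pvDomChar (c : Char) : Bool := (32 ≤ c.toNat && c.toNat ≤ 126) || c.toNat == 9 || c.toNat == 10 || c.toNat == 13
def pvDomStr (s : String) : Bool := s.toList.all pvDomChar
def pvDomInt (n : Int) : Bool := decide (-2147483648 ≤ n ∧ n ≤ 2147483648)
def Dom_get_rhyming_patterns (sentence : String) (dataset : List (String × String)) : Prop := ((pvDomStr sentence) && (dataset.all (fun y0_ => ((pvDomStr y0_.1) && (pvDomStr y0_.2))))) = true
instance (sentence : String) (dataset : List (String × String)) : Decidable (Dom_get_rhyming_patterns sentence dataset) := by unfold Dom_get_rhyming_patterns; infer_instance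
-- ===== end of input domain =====

-- B fuses A's two passes (word->IPA dict, then grouping over its items) into one pass
-- over the words with a seen-set; return value only, objective: simpler.


-- ===== PORT A =====
-- helper: dataset.get(word.lower(), "").split(", ")
def get_ipa_transcriptions (word : String) (dataset : PySem.Dict String String) : List String :=
  ((PySem.Str.split? (dataset.getD (PySem.Str.lower word) "") ", ").getD [])  -- sep nonempty: split? is never none

def get_rhyming_patterns (sentence : String) (dataset : List (String × String)) : List (String × List String) :=
  let d := PySem.Dict.ofList dataset
  let words := PySem.Str.split₀ sentence
  -- word_ipa_map: for word in words: map.update({word: [_.strip("/") for _ in ipas]})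
  let word_ipa_map : PySem.Dict String (List String) :=
    words.foldl (fun m word =>
      m.insert word ((get_ipa_transcriptions word d).map (fun t => PySem.Str.stripChars t "/")))
      PySem.Dict.empty
  -- rhyming_patterns = defaultdict(list); for word, ipas in items: for ipa in ipas: rp[ipa[-2:]].append(word)
  let rhyming_patterns : PySem.Dict String (List String) :=
    word_ipa_map.items.foldl (fun r wi =>
      wi.2.foldl (fun r ipa =>
        r.modify (PySem.Str.slice ipa (some (-2)) none) [] (fun l => l ++ [wi.1])) r)
      PySem.Dict.empty
  rhyming_patterns.items

-- ===== PORT B =====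
def get_rhyming_patterns_alt (sentence : String) (dataset : List (String × String)) : List (String × List String) :=
  let d := PySem.Dict.ofList dataset
  let res := (PySem.Str.split₀ sentence).foldl
    (fun (st : PySem.Dict String (List String) × PySem.Set String) word =>
      if PySem.Set.contains st.2 word then st
      else
        (((PySem.Str.split? (d.getD (PySem.Str.lower word) "") ", ").getD []).foldl
          (fun r ipa =>
            r.modify (PySem.Str.slice (PySem.Str.stripChars ipa "/") (some (-2)) none) [] (fun l => l ++ [word])) st.1,
         PySem.Set.add st.2 word))
    (PySem.Dict.empty, PySem.Set.empty)
  res.1.items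

-- ===== PRECONDITION & SPEC =====
def Spec_get_rhyming_patterns (sentence : String) (dataset : List (String × String)) (out : List (String × List String)) : Prop := out = get_rhyming_patterns_alt sentence dataset
instance (sentence : String) (dataset : List (String × String)) (out : List (String × List String)) : Decidable (Spec_get_rhyming_patterns sentence dataset out) := by unfold Spec_get_rhyming_patterns; infer_instance

-- ===== CLAIM (what is proved, stated in full; the proofs are below) =====
def Claim_equal_get_rhyming_patterns : Prop := ∀ (sentence : String) (dataset : List (String × String)), Dom_get_rhyming_patterns sentence dataset → Spec_get_rhyming_patterns sentence dataset (get_rhyming_patterns sentence dataset)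

-- ===== LEMMAS AND PROOFS =====

-- the per-word grouping step shared by both sides (proof abbreviation only)
def pvGroupStep (f : String → List String) (r : PySem.Dict String (List String)) (w : String) : PySem.Dict String (List String) :=
  (f w).foldl (fun r ipa =>
    r.modify (PySem.Str.slice ipa (some (-2)) none) [] (fun l => l ++ [w])) r

-- A's first loop: inserting (w, f w) for each word builds exactly the deduped word list paired with f
lemma items_foldl_insert_keyed (f : String → List String) :
    ∀ (ws : List String) (S : PySem.Set String), S.Nodup →
      ((ws.foldl (fun m w => m.insert w (f w))
          (PySem.Dict.mk (S.map (fun w => (w, f w))))).items)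
        = (PySem.Set.update S ws).map (fun w => (w, f w)) := by
  intro ws
  induction ws with
  | nil => intro S _; simp [PySem.Set.update]
  | cons w ws ih =>
    intro S hS
    have hkeys : (PySem.Dict.mk (S.map (fun w => (w, f w)))).keys = S := by
      simp [PySem.Dict.keys, Function.comp_def]
    by_cases hw : w ∈ S
    · have hc : (PySem.Dict.mk (S.map (fun w => (w, f w)))).contains w = true := by
        rw [PySem.Dict.contains_iff_mem_keys, hkeys]; exact hw
      have hins : (PySem.Dict.mk (S.map (fun w => (w, f w)))).insert w (f w)
          = PySem.Dict.mk (S.map (fun w => (w, f w))) := by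
        apply PySem.Dict.ext
        rw [PySem.Dict.items_insert_of_contains _ _ hc]
        show (S.map (fun w => (w, f w))).map _ = S.map (fun w => (w, f w))
        rw [List.map_map]
        apply List.map_congr_left
        intro x _
        by_cases hx : x = w
        · simp [hx]
        · simp [Function.comp, show (x == w) = false by simpa using hx]
      have hadd : PySem.Set.add S w = S := by simp [PySem.Set.add, PySem.Set.contains, hw]
      simp only [List.foldl_cons, hins, PySem.Set.update, List.foldl_cons, hadd]
      exact ih S hS
    · have hc : (PySem.Dict.mk (S.map (fun w => (w, f w)))).contains w = false := by
        rw [← Bool.not_eq_true, PySem.Dict.contains_iff_mem_keys, hkeys]; exact hw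
      have hins : (PySem.Dict.mk (S.map (fun w => (w, f w)))).insert w (f w)
          = PySem.Dict.mk ((S ++ [w]).map (fun w => (w, f w))) := by
        apply PySem.Dict.ext
        rw [PySem.Dict.items_insert_of_not_contains _ _ hc]
        simp
      have hadd : PySem.Set.add S w = S ++ [w] := by
        simp [PySem.Set.add, PySem.Set.contains, hw]
      simp only [List.foldl_cons, hins, PySem.Set.update, List.foldl_cons, hadd]
      refine ih (S ++ [w]) ?_
      simp [List.nodup_append, hS]
      exact fun a ha h => hw (h ▸ ha)
  
-- Set.update only appends new elements
lemma set_update_append (ws : List String) : ∀ (S : PySem.Set String),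
    ∃ e, PySem.Set.update S ws = S ++ e := by
  induction ws with
  | nil => intro S; exact ⟨[], by simp [PySem.Set.update]⟩
  | cons w ws ih =>
    intro S
    by_cases hw : S.contains w
    · have hw' : w ∈ S := by simpa using hw
      have : PySem.Set.add S w = S := by simp [PySem.Set.add, hw']
      simpa [PySem.Set.update, this] using ih S
    · have h1 : PySem.Set.add S w = S ++ [w] := by
        simp only [PySem.Set.add, hw]; simp
      obtain ⟨e, he⟩ := ih (S ++ [w])
      refine ⟨w :: e, ?_⟩
      simp only [PySem.Set.update] at he ⊢
      simp only [List.foldl_cons, h1, he, List.append_assoc, List.cons_append, List.nil_append]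

-- B's loop: its dict component is the fold of the group step over the NEW (unseen) words in order
lemma alt_fold_inv (f : String → List String) :
    ∀ (ws : List String) (r : PySem.Dict String (List String)) (S : PySem.Set String),
      ws.foldl (fun st w => if PySem.Set.contains st.2 w then st
          else (pvGroupStep f st.1 w, PySem.Set.add st.2 w)) (r, S)
        = (((PySem.Set.update S ws).drop S.length).foldl (pvGroupStep f) r,
           PySem.Set.update S ws) := by
  intro ws
  induction ws with
  | nil => intro r S; simp [PySem.Set.update]
  | cons w ws ih =>
    intro r S
    by_cases hw : S.contains w
    · have hw' : w ∈ S := by simpa using hw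
      have hadd : PySem.Set.add S w = S := by simp [PySem.Set.add, hw']
      simp only [List.foldl_cons, hw, if_true, PySem.Set.update, hadd]
      exact ih r S
    · have hadd : PySem.Set.add S w = S ++ [w] := by
        simp only [PySem.Set.add, hw]; simp
      simp only [List.foldl_cons, hw, if_false, Bool.false_eq_true, hadd]
      rw [ih (pvGroupStep f r w) (S ++ [w])]
      obtain ⟨e, he⟩ := set_update_append ws (S ++ [w])
      simp only [PySem.Set.update, List.foldl_cons, hadd] at he ⊢
      rw [he]
      have h1 : ((S ++ [w]) ++ e).drop S.length = w :: e := by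
        rw [List.append_assoc]
        simp
      have h2 : ((S ++ [w]) ++ e).drop (S ++ [w]).length = e := by
        simp
      rw [h1, h2]
      rfl

-- ===== VERDICT (by name: the statement is the Claim_ definition above) =====
theorem get_rhyming_patterns_spec : Claim_equal_get_rhyming_patterns := by
  intro sentence dataset _
  unfold Spec_get_rhyming_patterns get_rhyming_patterns get_rhyming_patterns_alt
  set d := PySem.Dict.ofList dataset with hd
  set words := PySem.Str.split₀ sentence with hwords
  set f : String → List String :=
    fun w => (get_ipa_transcriptions w d).map (fun t => PySem.Str.stripChars t "/") with hf
  -- A's first loop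
  have hA1 : (words.foldl (fun m w => m.insert w (f w)) PySem.Dict.empty).items
      = (PySem.Set.ofList words).map (fun w => (w, f w)) := by
    have := items_foldl_insert_keyed f words [] (by simp)
    simpa [PySem.Dict.empty, PySem.Set.ofList_eq_foldl, PySem.Set.update] using this
  -- B's loop
  have hB : words.foldl (fun st w => if PySem.Set.contains st.2 w then st
        else (pvGroupStep f st.1 w, PySem.Set.add st.2 w)) (PySem.Dict.empty, PySem.Set.empty)
      = ((PySem.Set.ofList words).foldl (pvGroupStep f) PySem.Dict.empty,
         PySem.Set.ofList words) := by
    have := alt_fold_inv f words PySem.Dict.empty PySem.Set.empty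
    simpa [PySem.Set.empty, PySem.Set.ofList_eq_foldl, PySem.Set.update] using this
  -- align B's literal step with pvGroupStep, then A's grouping loop with the same fold
  show (((words.foldl (fun m w => m.insert w (f w)) PySem.Dict.empty).items).foldl
      (fun r wi => wi.2.foldl (fun r ipa =>
        r.modify (PySem.Str.slice ipa (some (-2)) none) [] (fun l => l ++ [wi.1])) r)
      PySem.Dict.empty).items
    = ((words.foldl (fun st w => if PySem.Set.contains st.2 w then st
        else (((PySem.Str.split? (d.getD (PySem.Str.lower w) "") ", ").getD []).foldl
          (fun r ipa => r.modify (PySem.Str.slice (PySem.Str.stripChars ipa "/") (some (-2)) none) []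
            (fun l => l ++ [w])) st.1,
         PySem.Set.add st.2 w)) (PySem.Dict.empty, PySem.Set.empty)).1).items
  have hstep : (fun (st : PySem.Dict String (List String) × PySem.Set String) w =>
      if PySem.Set.contains st.2 w then st
      else (((PySem.Str.split? (d.getD (PySem.Str.lower w) "") ", ").getD []).foldl
          (fun r ipa => r.modify (PySem.Str.slice (PySem.Str.stripChars ipa "/") (some (-2)) none) []
            (fun l => l ++ [w])) st.1,
         PySem.Set.add st.2 w))
      = (fun st w => if PySem.Set.contains st.2 w then st
          else (pvGroupStep f st.1 w, PySem.Set.add st.2 w)) := by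
    funext st w
    simp only [pvGroupStep, hf, get_ipa_transcriptions, List.foldl_map]
  rw [hstep, hB, hA1, List.foldl_map]
  rfl
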